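-- pv_equiv track=rewrite | github.com/jiwon199/Algorithms-Study | 기타알고리즘/호텔 방 배정.py | find_room
-- ===== SOURCE A (Python) =====
-- def find_room(chk,key,room):
--     #방이 비었으면
--     if chk not in key:
--         room[chk]=chk+1 #chk는 chk+1번부터 확인해라
--         return chk
--
--     empty=find_room(room[chk],key,room)
--     # 빈방이 나오기 전 방문했던 부모 노드 바꿔줌
--     room[chk]=empty+1 #chk는 empty+1번방부터 확인해라
--     return empty
--
--
--     return chk
-- ===== SOURCE B (Python) =====
-- def find_room(chk, key, room):
--     occupied = set(key)
--     # Pass 1: find the empty room by iterating the pointer map a bounded number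
--     # of times (a terminating run of the original visits at most len(key) keys,
--     # and a non-key room is a fixpoint).
--     empty = chk
--     for _ in range(len(key)):
--         if empty in occupied:
--             empty = room[empty]
--     # Pass 2: re-walk the chain, compressing every visited pointer to empty+1.
--     node = chk
--     while node in occupied:
--         nxt = room[node]
--         room[node] = empty + 1
--         node = nxt
--     room[node] = empty + 1
--     return empty
-- ===== Notes on version B (the rewrite author's own statement) =====
-- stated objective: alternative
-- what changed: Replaced A's single recursive descent (which finds the empty room and rewrites pointers while unwinding) by two iterative passes: a bounded for-loop folding the pointer map to its non-key fixpoint to find the empty room, then a second forward walk rewriting every visited pointer; no recursion and no call stack.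
import Mathlib
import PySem

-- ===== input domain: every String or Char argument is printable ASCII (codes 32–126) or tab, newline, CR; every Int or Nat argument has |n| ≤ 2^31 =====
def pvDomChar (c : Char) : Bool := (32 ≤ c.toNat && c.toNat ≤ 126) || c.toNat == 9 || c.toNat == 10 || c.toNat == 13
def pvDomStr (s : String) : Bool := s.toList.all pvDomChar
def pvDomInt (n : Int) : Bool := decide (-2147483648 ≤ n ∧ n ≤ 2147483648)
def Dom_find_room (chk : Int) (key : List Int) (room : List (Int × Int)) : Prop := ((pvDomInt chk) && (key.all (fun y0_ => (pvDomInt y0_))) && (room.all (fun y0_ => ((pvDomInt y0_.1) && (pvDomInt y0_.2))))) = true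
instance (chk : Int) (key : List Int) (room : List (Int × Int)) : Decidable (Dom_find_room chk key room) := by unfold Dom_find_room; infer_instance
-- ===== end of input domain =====

-- B replaces A's recursion by two iterative passes: a bounded fold of the pointer map to its
-- non-key fixpoint (the empty room), then a second walk rewriting the visited pointers.
-- Both Pythons mutate `room` identically (every visited node set to empty+1); the equivalence
-- proved here is about the RETURN value, so the ports compute the returned integer.

-- ===== PORT A =====
-- Recursive search, fuel-bounded to be total: Pre_ guarantees fuel key.length+1 suffices
-- (a returning run of A visits pairwise-distinct members of key). Threads the mutated dict.
def find_room_go (key : List Int) : Nat → Int → PySem.Dict Int Int → Option (Int × PySem.Dict Int Int)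
  | 0, _, _ => none
  | f + 1, chk, room =>
    if chk ∈ key then
      match PySem.Dict.get? room chk with
      | none => none  -- KeyError: room[chk]
      | some nxt =>
        match find_room_go key f nxt room with
        | none => none
        | some (empty, room') => some (empty, PySem.Dict.insert room' chk (empty + 1))
    else
      some (chk, PySem.Dict.insert room chk (chk + 1))

def find_room (chk : Int) (key : List Int) (room : List (Int × Int)) : Int :=
  match find_room_go key (key.length + 1) chk (PySem.Dict.ofList room) with
  | some (empty, _) => empty
  | none => 0  -- unreachable under Pre_ (A raises there)

-- ===== PORT B =====
-- Pass 1 of Source B: fold the step map `empty ↦ room[empty] if empty in occupied else empty`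
-- len(key) times over the ORIGINAL room (a missing lookup is a KeyError, outside Pre_;
-- getD keeps the fold total and is never taken under Pre_). Pass 2 of Source B only mutates
-- room and does not touch the returned integer, so the port of the return value ends here.
def find_room_alt (chk : Int) (key : List Int) (room : List (Int × Int)) : Int :=
  let occupied : PySem.Set Int := PySem.Set.ofList key
  let d := PySem.Dict.ofList room
  (List.range key.length).foldl
    (fun empty _ => if PySem.Set.contains occupied empty then PySem.Dict.getD d empty empty else empty)
    chk

-- ===== PRECONDITION & SPEC =====
-- The pointer chain chk, room[chk], room[room[chk]], … from the ORIGINAL room (all reads in A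
-- happen before any write): chain n = the n-th element, none once a lookup misses.
def find_room_chain (room : List (Int × Int)) (chk : Int) : Nat → Option Int
  | 0 => some chk
  | n + 1 => (find_room_chain room chk n).bind (fun c => PySem.Dict.get? (PySem.Dict.ofList room) c)

-- Pre_ = exactly the inputs on which Python A returns: the chain escapes key at some step
-- n ≤ key.length with all lookups present (a returning run visits distinct members of key, so
-- n ≤ key.length is no restriction); otherwise A raises KeyError or RecursionError.
def pvPreB_find_room (chk : Int) (key : List Int) (room : List (Int × Int)) : Bool :=
  (List.range (key.length + 1)).any (fun n =>
    (List.range n).all (fun i =>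
      match find_room_chain room chk i with
      | some c => key.contains c
      | none => false)
    && match find_room_chain room chk n with
       | some c => !key.contains c
       | none => false)

def Pre_find_room (chk : Int) (key : List Int) (room : List (Int × Int)) : Prop :=
  pvPreB_find_room chk key room = true
instance (chk : Int) (key : List Int) (room : List (Int × Int)) : Decidable (Pre_find_room chk key room) := by unfold Pre_find_room; infer_instance

def pvWitness_find_room : Int × List Int × (List (Int × Int)) := (0, [0, 1], [(0, 1), (1, 2)])

def Spec_find_room (chk : Int) (key : List Int) (room : List (Int × Int)) (out : Int) : Prop := out = find_room_alt chk key room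
instance (chk : Int) (key : List Int) (room : List (Int × Int)) (out : Int) : Decidable (Spec_find_room chk key room out) := by unfold Spec_find_room; infer_instance

-- ===== CLAIM (what is proved, stated in full; the proofs are below) =====
def Claim_equal_find_room : Prop := ∀ (chk : Int) (key : List Int) (room : List (Int × Int)), Dom_find_room chk key room → Pre_find_room chk key room → Spec_find_room chk key room (find_room chk key room)

-- ===== LEMMAS AND PROOFS =====

-- Pure fuelled chase of the pointer chain: the common characterisation both ports are
-- reduced to.  chase f c = the first non-key element reached from c within f expansions.
def pvChase (key : List Int) (d : PySem.Dict Int Int) : Nat → Int → Option Int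
  | 0, _ => none
  | f + 1, c =>
    if c ∈ key then (PySem.Dict.get? d c).bind (pvChase key d f) else some c

-- A's recursion returns (as first component) exactly the chase value.
theorem find_room_go_chase (key : List Int) (d : PySem.Dict Int Int) :
    ∀ (f : Nat) (c : Int), (find_room_go key f c d).map Prod.fst = pvChase key d f c := by
  intro f
  induction f with
  | zero => intro c; rfl
  | succ f ih =>
    intro c
    simp only [find_room_go, pvChase]
    by_cases h : c ∈ key
    · simp only [if_pos h]
      cases hg : PySem.Dict.get? d c with
      | none => rfl
      | some nxt =>
        simp only [Option.bind_some, ← ih nxt]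
        cases find_room_go key f nxt d with
        | none => rfl
        | some p => cases p <;> rfl
    · simp [if_neg h]

-- chase is monotone in fuel.
theorem pvChase_mono (key : List Int) (d : PySem.Dict Int Int) :
    ∀ (f : Nat) (c : Int) (e : Int), pvChase key d (f + 1) c = some e →
      ∀ (g : Nat), f ≤ g → pvChase key d (g + 1) c = some e := by
  intro f
  induction f with
  | zero =>
    intro c e h g _
    by_cases hc : c ∈ key
    · simp only [pvChase, if_pos hc] at h
      cases hg : PySem.Dict.get? d c with
      | none => rw [hg] at h; simp at h
      | some nxt => rw [hg] at h; simp at h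
    · simp only [pvChase, if_neg hc] at h ⊢
      exact h
  | succ f ih =>
    intro c e h g hg
    by_cases hc : c ∈ key
    · simp only [pvChase, if_pos hc] at h
      cases hget : PySem.Dict.get? d c with
      | none => rw [hget] at h; simp at h
      | some nxt =>
        rw [hget] at h
        simp only [Option.bind_some] at h
        obtain ⟨g', rfl⟩ : ∃ g', g = g' + 1 := ⟨g - 1, by omega⟩
        have := ih nxt e h g' (by omega)
        simp only [pvChase, if_pos hc, hget, Option.bind_some]
        exact this
    · simp only [pvChase, if_neg hc] at h ⊢
      exact h

-- The step function of B's fold.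
def pvStep (key : List Int) (d : PySem.Dict Int Int) (c : Int) : Int :=
  if PySem.Set.contains (PySem.Set.ofList key) c then PySem.Dict.getD d c c else c

theorem pvStep_not_mem (key : List Int) (d : PySem.Dict Int Int) (c : Int) (h : c ∉ key) :
    pvStep key d c = c := by
  simp [pvStep, PySem.Set.mem_ofList, h]

-- Iterating pvStep m ≥ f times lands on the chase value.
theorem pvStep_iterate (key : List Int) (d : PySem.Dict Int Int) :
    ∀ (f : Nat) (c : Int) (e : Int), pvChase key d (f + 1) c = some e →
      ∀ (m : Nat), f ≤ m → (pvStep key d)^[m] c = e := by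
  intro f
  induction f with
  | zero =>
    intro c e h m _
    by_cases hc : c ∈ key
    · simp only [pvChase, if_pos hc] at h
      cases hg : PySem.Dict.get? d c with
      | none => rw [hg] at h; simp at h
      | some nxt => rw [hg] at h; simp at h
    · simp only [pvChase, if_neg hc, Option.some.injEq] at h
      subst h
      exact Function.iterate_fixed (pvStep_not_mem key d c hc) m
  | succ f ih =>
    intro c e h m hm
    by_cases hc : c ∈ key
    · simp only [pvChase, if_pos hc] at h
      cases hget : PySem.Dict.get? d c with
      | none => rw [hget] at h; simp at h
      | some nxt =>
        rw [hget] at h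
        simp only [Option.bind_some] at h
        obtain ⟨m', rfl⟩ : ∃ m', m = m' + 1 := ⟨m - 1, by omega⟩
        have hstep : pvStep key d c = nxt := by
          simp [pvStep, PySem.Set.mem_ofList, hc, PySem.Dict.getD, hget]
        rw [Function.iterate_succ_apply, hstep]
        exact ih nxt e h m' (by omega)
    · simp only [pvChase, if_neg hc, Option.some.injEq] at h
      subst h
      exact Function.iterate_fixed (pvStep_not_mem key d c hc) m

-- A foldl over any list that ignores the element is an iterate.
theorem pvFoldl_iterate {α β : Type} (g : α → α) :
    ∀ (l : List β) (c : α), l.foldl (fun cur _ => g cur) c = g^[l.length] c := by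
  intro l
  induction l with
  | nil => intro c; rfl
  | cons x xs ih =>
    intro c
    simp only [List.foldl_cons, List.length_cons, ih (g c)]
    rw [Function.iterate_succ_apply]

-- Shift lemma for the chain used by Pre_.
theorem find_room_chain_shift (room : List (Int × Int)) (chk : Int) :
    ∀ (n : Nat), find_room_chain room chk (n + 1) =
      (PySem.Dict.get? (PySem.Dict.ofList room) chk).bind (fun c => find_room_chain room c n) := by
  intro n
  induction n with
  | zero =>
    simp only [find_room_chain, Option.bind_some]
    cases PySem.Dict.get? (PySem.Dict.ofList room) chk with
    | none => rfl
    | some c => rfl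
  | succ n ih =>
    show (find_room_chain room chk (n + 1)).bind _ = _
    rw [ih]
    cases PySem.Dict.get? (PySem.Dict.ofList room) chk <;> rfl

-- A chain that stays in key for i < n and escapes at step n yields chase fuel n+1.
theorem pvChain_chase (key : List Int) (room : List (Int × Int)) :
    ∀ (n : Nat) (chk e : Int),
      (∀ i, i < n → ∃ c, find_room_chain room chk i = some c ∧ c ∈ key) →
      find_room_chain room chk n = some e → e ∉ key →
      pvChase key (PySem.Dict.ofList room) (n + 1) chk = some e := by
  intro n
  induction n with
  | zero =>
    intro chk e _ hn he
    simp only [find_room_chain, Option.some.injEq] at hn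
    subst hn
    simp [pvChase, he]
  | succ n ih =>
    intro chk e hall hn he
    have h0 : chk ∈ key := by
      obtain ⟨c, hc, hck⟩ := hall 0 (Nat.succ_pos n)
      simp only [find_room_chain, Option.some.injEq] at hc
      subst hc; exact hck
    rw [find_room_chain_shift] at hn
    cases hget : PySem.Dict.get? (PySem.Dict.ofList room) chk with
    | none => rw [hget] at hn; simp at hn
    | some c0 =>
      rw [hget] at hn
      simp only [Option.bind_some] at hn
      have hall' : ∀ i, i < n → ∃ c, find_room_chain room c0 i = some c ∧ c ∈ key := by
        intro i hi
        obtain ⟨c, hc, hck⟩ := hall (i + 1) (by omega)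
        rw [find_room_chain_shift, hget, Option.bind_some] at hc
        exact ⟨c, hc, hck⟩
      have := ih c0 e hall' hn he
      simp only [pvChase, if_pos h0, hget, Option.bind_some]
      exact this

-- Extract the combinatorial content of Pre_.
theorem pvPre_chase (chk : Int) (key : List Int) (room : List (Int × Int))
    (h : Pre_find_room chk key room) :
    ∃ e, pvChase key (PySem.Dict.ofList room) (key.length + 1) chk = some e := by
  unfold Pre_find_room pvPreB_find_room at h
  rw [List.any_eq_true] at h
  obtain ⟨n, hmem, hn⟩ := h
  rw [List.mem_range] at hmem
  rw [Bool.and_eq_true] at hn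
  obtain ⟨hall, hesc⟩ := hn
  cases hcn : find_room_chain room chk n with
  | none => rw [hcn] at hesc; simp at hesc
  | some e =>
    rw [hcn] at hesc
    have he : e ∉ key := by
      simpa using hesc
    have hall' : ∀ i, i < n → ∃ c, find_room_chain room chk i = some c ∧ c ∈ key := by
      intro i hi
      rw [List.all_eq_true] at hall
      have := hall i (by rw [List.mem_range]; exact hi)
      cases hci : find_room_chain room chk i with
      | none => rw [hci] at this; simp at this
      | some c =>
        rw [hci] at this
        exact ⟨c, rfl, by simpa using this⟩
    have hch := pvChain_chase key room n chk e hall' hcn he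
    exact ⟨e, pvChase_mono key (PySem.Dict.ofList room) n chk e hch key.length (by omega)⟩

-- ===== VERDICT (by name: the statement is the Claim_ definition above) =====
theorem find_room_spec : Claim_equal_find_room := by
  intro chk key room _ hpre
  obtain ⟨e, hch⟩ := pvPre_chase chk key room hpre
  unfold Spec_find_room find_room find_room_alt
  have hA := find_room_go_chase key (PySem.Dict.ofList room) (key.length + 1) chk
  rw [hch] at hA
  cases hgo : find_room_go key (key.length + 1) chk (PySem.Dict.ofList room) with
  | none => rw [hgo] at hA; simp at hA
  | some p =>
    rw [hgo] at hA
    cases p with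
    | mk e1 r =>
      simp only [Option.map_some, Option.some.injEq] at hA
      have hB : (List.range key.length).foldl
          (fun empty _ => if PySem.Set.contains (PySem.Set.ofList key) empty then PySem.Dict.getD (PySem.Dict.ofList room) empty empty else empty)
          chk = e := by
        have := pvFoldl_iterate (pvStep key (PySem.Dict.ofList room)) (List.range key.length) chk
        simp only [List.length_range] at this
        calc (List.range key.length).foldl _ chk
            = (pvStep key (PySem.Dict.ofList room))^[key.length] chk := this
          _ = e := pvStep_iterate key (PySem.Dict.ofList room) key.length chk e hch key.length (le_refl _)
      exact hA.trans hB.symm
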